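-- pv_equiv track=rewrite | github.com/Mouy-leng/GenX_FX | generate_domain_suggestions.py | categorize_suggestions
-- ===== SOURCE A (Python) =====
-- def categorize_suggestions(suggestions):
--     """Categorize domain suggestions by type"""
--     categories = {
--         'Premium (.com)': [],
--         'Tech (.io, .ai, .tech)': [],
--         'Trading Specific (.trading, .fx, .pro)': [],
--         'Alternative (.co, .net, .org)': [],
--         'Modern (.app, .dev, .live)': []
--     }
--
--     for domain in suggestions:
--         if domain.endswith('.com'):
--             categories['Premium (.com)'].append(domain)
--         elif any(domain.endswith(ext) for ext in ['.io', '.ai', '.tech']):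
--             categories['Tech (.io, .ai, .tech)'].append(domain)
--         elif any(domain.endswith(ext) for ext in ['.trading', '.fx', '.pro']):
--             categories['Trading Specific (.trading, .fx, .pro)'].append(domain)
--         elif any(domain.endswith(ext) for ext in ['.co', '.net', '.org']):
--             categories['Alternative (.co, .net, .org)'].append(domain)
--         elif any(domain.endswith(ext) for ext in ['.app', '.dev', '.live']):
--             categories['Modern (.app, .dev, .live)'].append(domain)
--
--     return categories
-- ===== SOURCE B (Python) =====
-- _TABLE = [
--     ('Premium (.com)', ('.com',)),
--     ('Tech (.io, .ai, .tech)', ('.io', '.ai', '.tech')),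
--     ('Trading Specific (.trading, .fx, .pro)', ('.trading', '.fx', '.pro')),
--     ('Alternative (.co, .net, .org)', ('.co', '.net', '.org')),
--     ('Modern (.app, .dev, .live)', ('.app', '.dev', '.live')),
-- ]
--
--
-- def _category(domain):
--     """Name of the first (highest-priority) category whose suffixes match, else None."""
--     for name, exts in _TABLE:
--         if domain.endswith(exts):
--             return name
--     return None
--
--
-- def categorize_suggestions(suggestions):
--     """Categorize domain suggestions by type"""
--     return {name: [d for d in suggestions if _category(d) == name]
--             for name, _ in _TABLE}
-- ===== Notes on version B (the rewrite author's own statement) =====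
-- stated objective: idiomatic
-- what changed: Replaces the single-pass if/elif chain that appends into a pre-built dict with a data-driven classifier (first matching entry of a priority table, using tuple endswith) plus one filtering comprehension per category.
import Mathlib
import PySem

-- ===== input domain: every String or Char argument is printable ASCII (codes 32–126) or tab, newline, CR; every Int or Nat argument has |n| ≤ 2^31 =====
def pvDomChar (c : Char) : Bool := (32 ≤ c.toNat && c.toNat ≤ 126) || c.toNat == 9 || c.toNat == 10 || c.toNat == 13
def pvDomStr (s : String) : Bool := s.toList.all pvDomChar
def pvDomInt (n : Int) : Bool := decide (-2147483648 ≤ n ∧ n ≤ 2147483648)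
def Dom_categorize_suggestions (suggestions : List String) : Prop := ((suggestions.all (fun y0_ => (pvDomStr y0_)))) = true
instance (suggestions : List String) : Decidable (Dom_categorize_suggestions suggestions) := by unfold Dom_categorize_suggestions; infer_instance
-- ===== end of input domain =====

-- B replaces A's single-pass if/elif append-into-dict loop with a priority-table classifier
-- and one filter pass per category (idiomatic, data-driven; same O(n) cost).


-- ===== PORT A =====
-- literal transliteration of A: build the 5-key dict, then one pass over suggestions
-- with the if/elif chain appending the domain to the matching bucket; return the dict (its items).
def categorize_suggestions (suggestions : List String) : List (String × List String) :=
  let categories : PySem.Dict String (List String) :=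
    ((((PySem.Dict.empty.insert "Premium (.com)" ([] : List String)).insert
        "Tech (.io, .ai, .tech)" []).insert
        "Trading Specific (.trading, .fx, .pro)" []).insert
        "Alternative (.co, .net, .org)" []).insert
        "Modern (.app, .dev, .live)" []
  let final := suggestions.foldl (fun cats domain =>
    if PySem.Str.endswith domain ".com" then
      cats.modify "Premium (.com)" [] (fun l => l ++ [domain])
    else if [".io", ".ai", ".tech"].any (fun ext => PySem.Str.endswith domain ext) then
      cats.modify "Tech (.io, .ai, .tech)" [] (fun l => l ++ [domain])
    else if [".trading", ".fx", ".pro"].any (fun ext => PySem.Str.endswith domain ext) then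
      cats.modify "Trading Specific (.trading, .fx, .pro)" [] (fun l => l ++ [domain])
    else if [".co", ".net", ".org"].any (fun ext => PySem.Str.endswith domain ext) then
      cats.modify "Alternative (.co, .net, .org)" [] (fun l => l ++ [domain])
    else if [".app", ".dev", ".live"].any (fun ext => PySem.Str.endswith domain ext) then
      cats.modify "Modern (.app, .dev, .live)" [] (fun l => l ++ [domain])
    else cats) categories
  final.items

-- ===== PORT B =====
-- priority table: category name -> suffixes (Source B's _TABLE)
def pvTable : List (String × List String) :=
  [("Premium (.com)", [".com"]),
   ("Tech (.io, .ai, .tech)", [".io", ".ai", ".tech"]),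
   ("Trading Specific (.trading, .fx, .pro)", [".trading", ".fx", ".pro"]),
   ("Alternative (.co, .net, .org)", [".co", ".net", ".org"]),
   ("Modern (.app, .dev, .live)", [".app", ".dev", ".live"])]

-- Source B's _category: first table entry whose suffix list matches, else none
def pvCategory (domain : String) : Option String :=
  (pvTable.find? (fun p => p.2.any (fun ext => PySem.Str.endswith domain ext))).map (·.1)

def categorize_suggestions_alt (suggestions : List String) : List (String × List String) :=
  pvTable.map (fun p => (p.1, suggestions.filter (fun d => pvCategory d == some p.1)))

-- ===== PRECONDITION & SPEC =====
def Spec_categorize_suggestions (suggestions : List String) (out : List (String × List String)) : Prop := out = categorize_suggestions_alt suggestions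
instance (suggestions : List String) (out : List (String × List String)) : Decidable (Spec_categorize_suggestions suggestions out) := by unfold Spec_categorize_suggestions; infer_instance

-- ===== CLAIM (what is proved, stated in full; the proofs are below) =====
def Claim_equal_categorize_suggestions : Prop := ∀ (suggestions : List String), Dom_categorize_suggestions suggestions → Spec_categorize_suggestions suggestions (categorize_suggestions suggestions)

-- ===== LEMMAS AND PROOFS =====

-- classification of one domain under Source B's priority table
lemma pvCat1 (d : String) (h1 : PySem.Str.endswith d ".com" = true) :
    pvCategory d = some "Premium (.com)" := by
  simp [not_or] at h1
  simp [pvCategory, pvTable, List.find?, h1]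


lemma pvCat2 (d : String) (h1 : ¬ PySem.Str.endswith d ".com" = true)
    (h2 : ([".io", ".ai", ".tech"].any fun ext => PySem.Str.endswith d ext) = true) :
    pvCategory d = some "Tech (.io, .ai, .tech)" := by
  simp [not_or] at h1 h2
  rcases h2 with h | h | h <;> simp [pvCategory, pvTable, List.find?, h1, h]


lemma pvCat3 (d : String) (h1 : ¬ PySem.Str.endswith d ".com" = true)
    (h2 : ¬ ([".io", ".ai", ".tech"].any fun ext => PySem.Str.endswith d ext) = true)
    (h3 : ([".trading", ".fx", ".pro"].any fun ext => PySem.Str.endswith d ext) = true) :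
    pvCategory d = some "Trading Specific (.trading, .fx, .pro)" := by
  simp [not_or] at h1 h2 h3
  rcases h3 with h | h | h <;> simp [pvCategory, pvTable, List.find?, h1, h2.1, h2.2.1, h2.2.2, h]


lemma pvCat4 (d : String) (h1 : ¬ PySem.Str.endswith d ".com" = true)
    (h2 : ¬ ([".io", ".ai", ".tech"].any fun ext => PySem.Str.endswith d ext) = true)
    (h3 : ¬ ([".trading", ".fx", ".pro"].any fun ext => PySem.Str.endswith d ext) = true)
    (h4 : ([".co", ".net", ".org"].any fun ext => PySem.Str.endswith d ext) = true) :
    pvCategory d = some "Alternative (.co, .net, .org)" := by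
  simp [not_or] at h1 h2 h3 h4
  rcases h4 with h | h | h <;> simp [pvCategory, pvTable, List.find?, h1, h2.1, h2.2.1, h2.2.2, h3.1, h3.2.1, h3.2.2, h]


lemma pvCat5 (d : String) (h1 : ¬ PySem.Str.endswith d ".com" = true)
    (h2 : ¬ ([".io", ".ai", ".tech"].any fun ext => PySem.Str.endswith d ext) = true)
    (h3 : ¬ ([".trading", ".fx", ".pro"].any fun ext => PySem.Str.endswith d ext) = true)
    (h4 : ¬ ([".co", ".net", ".org"].any fun ext => PySem.Str.endswith d ext) = true)
    (h5 : ([".app", ".dev", ".live"].any fun ext => PySem.Str.endswith d ext) = true) :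
    pvCategory d = some "Modern (.app, .dev, .live)" := by
  simp [not_or] at h1 h2 h3 h4 h5
  rcases h5 with h | h | h <;> simp [pvCategory, pvTable, List.find?, h1, h2.1, h2.2.1, h2.2.2, h3.1, h3.2.1, h3.2.2, h4.1, h4.2.1, h4.2.2, h]


lemma pvCat0 (d : String) (h1 : ¬ PySem.Str.endswith d ".com" = true)
    (h2 : ¬ ([".io", ".ai", ".tech"].any fun ext => PySem.Str.endswith d ext) = true)
    (h3 : ¬ ([".trading", ".fx", ".pro"].any fun ext => PySem.Str.endswith d ext) = true)
    (h4 : ¬ ([".co", ".net", ".org"].any fun ext => PySem.Str.endswith d ext) = true)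
    (h5 : ¬ ([".app", ".dev", ".live"].any fun ext => PySem.Str.endswith d ext) = true) :
    pvCategory d = none := by
  simp [not_or] at h1 h2 h3 h4 h5
  simp [pvCategory, pvTable, List.find?, h1, h2.1, h2.2.1, h2.2.2, h3.1, h3.2.1, h3.2.2, h4.1, h4.2.1, h4.2.2, h5.1, h5.2.1, h5.2.2]

-- one step of A's loop on the literal 5-key dict (kernel computation on the literal keys)
lemma pv_step1 (l1 l2 l3 l4 l5 : List String) (d : String) :
    (PySem.Dict.mk [("Premium (.com)", l1), ("Tech (.io, .ai, .tech)", l2),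
      ("Trading Specific (.trading, .fx, .pro)", l3),
      ("Alternative (.co, .net, .org)", l4), ("Modern (.app, .dev, .live)", l5)]).modify
        "Premium (.com)" [] (fun l => l ++ [d]) =
    PySem.Dict.mk [("Premium (.com)", l1 ++ [d]), ("Tech (.io, .ai, .tech)", l2),
      ("Trading Specific (.trading, .fx, .pro)", l3),
      ("Alternative (.co, .net, .org)", l4), ("Modern (.app, .dev, .live)", l5)] := rfl

lemma pv_step2 (l1 l2 l3 l4 l5 : List String) (d : String) :
    (PySem.Dict.mk [("Premium (.com)", l1), ("Tech (.io, .ai, .tech)", l2),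
      ("Trading Specific (.trading, .fx, .pro)", l3),
      ("Alternative (.co, .net, .org)", l4), ("Modern (.app, .dev, .live)", l5)]).modify
        "Tech (.io, .ai, .tech)" [] (fun l => l ++ [d]) =
    PySem.Dict.mk [("Premium (.com)", l1), ("Tech (.io, .ai, .tech)", l2 ++ [d]),
      ("Trading Specific (.trading, .fx, .pro)", l3),
      ("Alternative (.co, .net, .org)", l4), ("Modern (.app, .dev, .live)", l5)] := rfl

lemma pv_step3 (l1 l2 l3 l4 l5 : List String) (d : String) :
    (PySem.Dict.mk [("Premium (.com)", l1), ("Tech (.io, .ai, .tech)", l2),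
      ("Trading Specific (.trading, .fx, .pro)", l3),
      ("Alternative (.co, .net, .org)", l4), ("Modern (.app, .dev, .live)", l5)]).modify
        "Trading Specific (.trading, .fx, .pro)" [] (fun l => l ++ [d]) =
    PySem.Dict.mk [("Premium (.com)", l1), ("Tech (.io, .ai, .tech)", l2),
      ("Trading Specific (.trading, .fx, .pro)", l3 ++ [d]),
      ("Alternative (.co, .net, .org)", l4), ("Modern (.app, .dev, .live)", l5)] := rfl

lemma pv_step4 (l1 l2 l3 l4 l5 : List String) (d : String) :
    (PySem.Dict.mk [("Premium (.com)", l1), ("Tech (.io, .ai, .tech)", l2),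
      ("Trading Specific (.trading, .fx, .pro)", l3),
      ("Alternative (.co, .net, .org)", l4), ("Modern (.app, .dev, .live)", l5)]).modify
        "Alternative (.co, .net, .org)" [] (fun l => l ++ [d]) =
    PySem.Dict.mk [("Premium (.com)", l1), ("Tech (.io, .ai, .tech)", l2),
      ("Trading Specific (.trading, .fx, .pro)", l3),
      ("Alternative (.co, .net, .org)", l4 ++ [d]), ("Modern (.app, .dev, .live)", l5)] := rfl

lemma pv_step5 (l1 l2 l3 l4 l5 : List String) (d : String) :
    (PySem.Dict.mk [("Premium (.com)", l1), ("Tech (.io, .ai, .tech)", l2),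
      ("Trading Specific (.trading, .fx, .pro)", l3),
      ("Alternative (.co, .net, .org)", l4), ("Modern (.app, .dev, .live)", l5)]).modify
        "Modern (.app, .dev, .live)" [] (fun l => l ++ [d]) =
    PySem.Dict.mk [("Premium (.com)", l1), ("Tech (.io, .ai, .tech)", l2),
      ("Trading Specific (.trading, .fx, .pro)", l3),
      ("Alternative (.co, .net, .org)", l4), ("Modern (.app, .dev, .live)", l5 ++ [d])] := rfl

-- the classifier predicate of bucket i, as used by B's filter
def pvIn (k : String) (d : String) : Bool := pvCategory d == some k

-- invariant of A's loop: folding from the 5-key dict with current buckets l1..l5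
-- appends to each bucket exactly the suggestions B's classifier sends there.
lemma pv_inv (s : List String) : ∀ (l1 l2 l3 l4 l5 : List String),
    (s.foldl (fun cats domain =>
      if PySem.Str.endswith domain ".com" then
        cats.modify "Premium (.com)" [] (fun l => l ++ [domain])
      else if [".io", ".ai", ".tech"].any (fun ext => PySem.Str.endswith domain ext) then
        cats.modify "Tech (.io, .ai, .tech)" [] (fun l => l ++ [domain])
      else if [".trading", ".fx", ".pro"].any (fun ext => PySem.Str.endswith domain ext) then
        cats.modify "Trading Specific (.trading, .fx, .pro)" [] (fun l => l ++ [domain])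
      else if [".co", ".net", ".org"].any (fun ext => PySem.Str.endswith domain ext) then
        cats.modify "Alternative (.co, .net, .org)" [] (fun l => l ++ [domain])
      else if [".app", ".dev", ".live"].any (fun ext => PySem.Str.endswith domain ext) then
        cats.modify "Modern (.app, .dev, .live)" [] (fun l => l ++ [domain])
      else cats)
      (PySem.Dict.mk [("Premium (.com)", l1), ("Tech (.io, .ai, .tech)", l2),
        ("Trading Specific (.trading, .fx, .pro)", l3),
        ("Alternative (.co, .net, .org)", l4), ("Modern (.app, .dev, .live)", l5)])) =
    PySem.Dict.mk [("Premium (.com)", l1 ++ s.filter (pvIn "Premium (.com)")),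
      ("Tech (.io, .ai, .tech)", l2 ++ s.filter (pvIn "Tech (.io, .ai, .tech)")),
      ("Trading Specific (.trading, .fx, .pro)", l3 ++ s.filter (pvIn "Trading Specific (.trading, .fx, .pro)")),
      ("Alternative (.co, .net, .org)", l4 ++ s.filter (pvIn "Alternative (.co, .net, .org)")),
      ("Modern (.app, .dev, .live)", l5 ++ s.filter (pvIn "Modern (.app, .dev, .live)"))] := by
  induction s with
  | nil => intro l1 l2 l3 l4 l5; simp
  | cons d s ih =>
    intro l1 l2 l3 l4 l5
    simp only [List.foldl_cons]
    by_cases h1 : PySem.Str.endswith d ".com" = true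
    · rw [if_pos h1, pv_step1, ih]
      simp [List.filter_cons, pvIn, pvCat1 d h1]
    rw [if_neg h1]
    by_cases h2 : ([".io", ".ai", ".tech"].any fun ext => PySem.Str.endswith d ext) = true
    · rw [if_pos h2, pv_step2, ih]
      simp [List.filter_cons, pvIn, pvCat2 d h1 h2]
    rw [if_neg h2]
    by_cases h3 : ([".trading", ".fx", ".pro"].any fun ext => PySem.Str.endswith d ext) = true
    · rw [if_pos h3, pv_step3, ih]
      simp [List.filter_cons, pvIn, pvCat3 d h1 h2 h3]
    rw [if_neg h3]
    by_cases h4 : ([".co", ".net", ".org"].any fun ext => PySem.Str.endswith d ext) = true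
    · rw [if_pos h4, pv_step4, ih]
      simp [List.filter_cons, pvIn, pvCat4 d h1 h2 h3 h4]
    rw [if_neg h4]
    by_cases h5 : ([".app", ".dev", ".live"].any fun ext => PySem.Str.endswith d ext) = true
    · rw [if_pos h5, pv_step5, ih]
      simp [List.filter_cons, pvIn, pvCat5 d h1 h2 h3 h4 h5]
    rw [if_neg h5, ih]
    simp [List.filter_cons, pvIn, pvCat0 d h1 h2 h3 h4 h5]

-- ===== VERDICT (by name: the statement is the Claim_ definition above) =====
theorem categorize_suggestions_spec : Claim_equal_categorize_suggestions := by
  intro s _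
  show categorize_suggestions s = categorize_suggestions_alt s
  have hA : categorize_suggestions s =
      (s.foldl (fun cats domain =>
        if PySem.Str.endswith domain ".com" then
          cats.modify "Premium (.com)" [] (fun l => l ++ [domain])
        else if [".io", ".ai", ".tech"].any (fun ext => PySem.Str.endswith domain ext) then
          cats.modify "Tech (.io, .ai, .tech)" [] (fun l => l ++ [domain])
        else if [".trading", ".fx", ".pro"].any (fun ext => PySem.Str.endswith domain ext) then
          cats.modify "Trading Specific (.trading, .fx, .pro)" [] (fun l => l ++ [domain])
        else if [".co", ".net", ".org"].any (fun ext => PySem.Str.endswith domain ext) then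
          cats.modify "Alternative (.co, .net, .org)" [] (fun l => l ++ [domain])
        else if [".app", ".dev", ".live"].any (fun ext => PySem.Str.endswith domain ext) then
          cats.modify "Modern (.app, .dev, .live)" [] (fun l => l ++ [domain])
        else cats)
        (PySem.Dict.mk [("Premium (.com)", ([] : List String)), ("Tech (.io, .ai, .tech)", []),
          ("Trading Specific (.trading, .fx, .pro)", []),
          ("Alternative (.co, .net, .org)", []), ("Modern (.app, .dev, .live)", [])])).items := rfl
  rw [hA, pv_inv s]
  simp [categorize_suggestions_alt, pvTable]
  exact ⟨rfl, rfl, rfl, rfl, rfl⟩
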